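-- pv_equiv track=rewrite | github.com/Lv-323python/learnRepo | tasks/chapter7.py | task_226
-- ===== SOURCE A (Python) =====
-- def task_226(nnumber, mnumber):
--     '''
--     There are given natural numbers m, n. Get all of them
--         natural total multiples, less m * n.
--
--     :param nnumber: int - natural number.
--     :param mnumber: int - natural number.
--     :return: list: int natural numbers.
--     '''
--
--     deduction = max(nnumber, mnumber)
--     start = mnumber * nnumber - deduction
--     amount = []
--     while start >= nnumber and start >= mnumber:
--         if start % nnumber == 0 and start % mnumber == 0:
--             amount.append(start)
--         start -= deduction
--     return amount
-- ===== SOURCE B (Python) =====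
-- def task_226(nnumber, mnumber):
--     if nnumber < 1 or mnumber < 1:
--         return []
--     a, b = nnumber, mnumber
--     while b:
--         a, b = b, a % b
--     g = a
--     lcm = nnumber * mnumber // g
--     return [k * lcm for k in range(g - 1, 0, -1)]
-- ===== Notes on version B (the rewrite author's own statement) =====
-- stated objective: faster
-- what changed: B replaces A's downward scan in steps of max(n,m) with a trial division at every step by a gcd/lcm computation (Euclid's algorithm) that emits the descending multiples of lcm(n,m) below n*m directly.
import Mathlib
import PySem

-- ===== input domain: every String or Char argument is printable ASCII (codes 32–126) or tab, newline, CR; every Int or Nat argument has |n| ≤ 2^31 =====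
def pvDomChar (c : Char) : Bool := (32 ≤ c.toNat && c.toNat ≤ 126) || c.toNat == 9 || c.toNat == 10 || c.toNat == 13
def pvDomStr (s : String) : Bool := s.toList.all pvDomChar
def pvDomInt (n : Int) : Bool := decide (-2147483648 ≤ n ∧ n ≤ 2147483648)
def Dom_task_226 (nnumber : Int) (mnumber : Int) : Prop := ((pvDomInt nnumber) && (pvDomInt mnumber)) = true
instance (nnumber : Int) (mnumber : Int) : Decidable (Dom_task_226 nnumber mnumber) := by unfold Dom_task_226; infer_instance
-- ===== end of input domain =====

-- B replaces A's step-by-max downward scan with gcd/lcm arithmetic, emitting the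
-- descending multiples of lcm(n,m) below n*m directly (objective: faster).

-- ===== PORT A =====
-- the `1 ≤ ded` guard only totalizes the loop (with ded ≤ 0 Python's loop either never
-- runs or never terminates); inside Pre_ it always holds
def task226Loop (nn mn ded start : Int) (acc : List Int) : List Int :=
  if _h : nn ≤ start ∧ mn ≤ start ∧ 1 ≤ ded then
    task226Loop nn mn ded (start - ded)
      (if PySem.Int.mod start nn = 0 ∧ PySem.Int.mod start mn = 0 then acc ++ [start] else acc)
  else acc
termination_by (start + 1 - nn).toNat
decreasing_by omega

def task_226 (nnumber : Int) (mnumber : Int) : List Int :=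
  let deduction := max nnumber mnumber
  let start := mnumber * nnumber - deduction
  task226Loop nnumber mnumber deduction start []

-- ===== PORT B =====
-- Source B's hand-written Euclid loop `while b: a, b = b, a % b`
def euclidLoop (a b : Int) : Int :=
  if _hb0 : b ≠ 0 then euclidLoop b (PySem.Int.mod a b) else a
termination_by b.natAbs
decreasing_by
  rcases lt_trichotomy b 0 with hb | hb | hb
  · have := PySem.Int.mod_neg_bounds a hb; omega
  · exact absurd hb _hb0
  · have h1 := PySem.Int.mod_nonneg a hb
    have h2 := PySem.Int.mod_lt a hb
    omega

def task_226_alt (nnumber : Int) (mnumber : Int) : List Int :=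
  if nnumber < 1 ∨ mnumber < 1 then []
  else
    let g := euclidLoop nnumber mnumber
    let lcm := PySem.Int.floordiv (nnumber * mnumber) g
    (PySem.List.pyRange (g - 1) 0 (-1)).map (fun k => k * lcm)

-- ===== PRECONDITION & SPEC =====
-- When both arguments are ≤ 0 the step `deduction` is ≤ 0 and Python A's while loop
-- never terminates; Pre_ excludes exactly those inputs (A returns on all others).
def Pre_task_226 (nnumber : Int) (mnumber : Int) : Prop := 1 ≤ nnumber ∨ 1 ≤ mnumber
instance (nnumber : Int) (mnumber : Int) : Decidable (Pre_task_226 nnumber mnumber) := by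
  unfold Pre_task_226; infer_instance

def pvWitness_task_226 : Int × Int := (4, 6)

def Spec_task_226 (nnumber : Int) (mnumber : Int) (out : List Int) : Prop := out = task_226_alt nnumber mnumber
instance (nnumber : Int) (mnumber : Int) (out : List Int) : Decidable (Spec_task_226 nnumber mnumber out) := by unfold Spec_task_226; infer_instance

-- ===== CLAIM (what is proved, stated in full; the proofs are below) =====
def Claim_equal_task_226 : Prop := ∀ (nnumber : Int) (mnumber : Int), Dom_task_226 nnumber mnumber → Pre_task_226 nnumber mnumber → Spec_task_226 nnumber mnumber (task_226 nnumber mnumber)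

-- ===== LEMMAS AND PROOFS =====

theorem euclidLoop_nat : ∀ (n m : Nat), euclidLoop (m : Int) (n : Int) = (Nat.gcd m n : Int) := by
  intro n
  induction n using Nat.strong_induction_on with
  | _ n ih =>
    intro m
    by_cases hn : n = 0
    · subst hn; rw [euclidLoop]; simp
    · have hpos : (0 : Int) < (n : Int) := by exact_mod_cast Nat.pos_of_ne_zero hn
      rw [euclidLoop]
      have hne : (n : Int) ≠ 0 := by omega
      rw [dif_pos hne, PySem.Int.mod_eq_emod_of_pos hpos]
      have hcast : (m : Int) % (n : Int) = ((m % n : Nat) : Int) := by push_cast; ring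
      rw [hcast, ih (m % n) (Nat.mod_lt _ (Nat.pos_of_ne_zero hn))]
      congr 1
      rw [Nat.gcd_comm m n, Nat.gcd_rec n m, Nat.gcd_comm]

theorem euclidLoop_eq_gcd (a b : Int) (ha : 0 ≤ a) (hb : 0 ≤ b) :
    euclidLoop a b = (Int.gcd a b : Int) := by
  have h1 : a = ((a.toNat : Nat) : Int) := by omega
  have h2 : b = ((b.toNat : Nat) : Int) := by omega
  rw [h1, h2, euclidLoop_nat]
  congr 1

-- the loop collects exactly the descending positive multiples of L that are ≤ start
theorem task226Loop_spec (nn mn mx L : Int)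
    (hnn : 1 ≤ nn) (_hmn : 1 ≤ mn) (hmx : mx = max nn mn)
    (hLpos : 0 < L) (hmxL : mx ∣ L)
    (hdiv : ∀ x : Int, (nn ∣ x ∧ mn ∣ x) ↔ L ∣ x) :
    ∀ start acc, mx ∣ start →
      task226Loop nn mn mx start acc =
        acc ++ (PySem.List.pyRange (PySem.Int.floordiv start L) 0 (-1)).map (fun k => k * L) := by
  have hmx1 : 1 ≤ mx := le_trans hnn (hmx ▸ le_max_left nn mn)
  have hmxLe : mx ≤ L := Int.le_of_dvd hLpos hmxL
  have key : ∀ k : Nat, ∀ start acc, (start + 1 - mx).toNat = k → mx ∣ start →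
      task226Loop nn mn mx start acc =
        acc ++ (PySem.List.pyRange (PySem.Int.floordiv start L) 0 (-1)).map (fun k => k * L) := by
    intro k
    induction k using Nat.strong_induction_on with
    | _ k ih =>
      intro start acc hk hdvd
      by_cases hc : nn ≤ start ∧ mn ≤ start
      · have hsm : mx ≤ start := hmx ▸ max_le hc.1 hc.2
        rw [task226Loop, dif_pos ⟨hc.1, hc.2, hmx1⟩]
        have hmodiff : (PySem.Int.mod start nn = 0 ∧ PySem.Int.mod start mn = 0) ↔ L ∣ start := by
          rw [PySem.Int.mod_eq_zero_iff_dvd, PySem.Int.mod_eq_zero_iff_dvd]; exact hdiv start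
        have hdvd' : mx ∣ (start - mx) := (dvd_sub_right hdvd).mpr dvd_rfl
        have hkdec : (start - mx + 1 - mx).toNat < k := by omega
        by_cases hdL : L ∣ start
        · rw [if_pos (hmodiff.mpr hdL)]
          obtain ⟨c0, hc0⟩ := hdL
          have hc0pos : 1 ≤ c0 := by
            by_contra hcon
            have : L * c0 ≤ 0 :=
              mul_nonpos_of_nonneg_of_nonpos (le_of_lt hLpos) (by omega)
            omega
          have hfd : PySem.Int.floordiv start L = c0 := by
            rw [PySem.Int.floordiv_eq_iff_of_pos hLpos]
            constructor <;> nlinarith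
          have hfd' : PySem.Int.floordiv (start - mx) L = c0 - 1 := by
            rw [PySem.Int.floordiv_eq_iff_of_pos hLpos]
            constructor <;> nlinarith
          rw [ih _ hkdec (start - mx) (acc ++ [start]) rfl hdvd', hfd', hfd,
            PySem.List.pyRange_neg_one_cons (by omega : (0:Int) < c0)]
          simp [hc0, mul_comm]
        · rw [if_neg (fun hcontra => hdL (hmodiff.mp hcontra))]
          have hb := (PySem.Int.floordiv_eq_iff_of_pos hLpos
            (a := start) (q := PySem.Int.floordiv start L)).mp rfl
          set c := PySem.Int.floordiv start L with hcdef
          have hne : start ≠ c * L := fun hEq => hdL ⟨c, by linarith [hEq]⟩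
          have hdvdcL : mx ∣ (start - c * L) := by
            have h1 : mx ∣ c * L := Dvd.dvd.mul_left hmxL c
            exact (dvd_sub_right hdvd).mpr h1
          have hgap : mx ≤ start - c * L :=
            Int.le_of_dvd (by omega) hdvdcL
          have hfd' : PySem.Int.floordiv (start - mx) L = c := by
            rw [PySem.Int.floordiv_eq_iff_of_pos hLpos]
            constructor <;> nlinarith
          rw [ih _ hkdec (start - mx) acc rfl hdvd', hfd']
      · rw [task226Loop, dif_neg (by tauto)]
        have hlt : start < mx := by
          rcases not_and_or.mp hc with h | h
          · have : start < nn := by omega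
            exact lt_of_lt_of_le this (hmx ▸ le_max_left nn mn)
          · have : start < mn := by omega
            exact lt_of_lt_of_le this (hmx ▸ le_max_right nn mn)
        have hsle : start ≤ 0 := by
          by_contra hcon
          have := Int.le_of_dvd (by omega) hdvd
          omega
        have hfd0 : PySem.Int.floordiv start L ≤ 0 := by
          have := (PySem.Int.floordiv_lt_iff_lt_mul hLpos
            (a := start) (q := 1)).mpr (by omega)
          omega
        rw [PySem.List.pyRange_neg_one_eq_nil hfd0]
        simp
  intro start acc hdvd
  exact key _ start acc rfl hdvd

-- ===== VERDICT (by name: the statement is the Claim_ definition above) =====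
theorem task_226_spec : Claim_equal_task_226 := by
  intro nn mn _ hpre
  unfold Spec_task_226 task_226 task_226_alt
  by_cases hboth : 1 ≤ nn ∧ 1 ≤ mn
  · obtain ⟨hnn, hmn⟩ := hboth
    rw [if_neg (by omega)]
    set G : Int := (Int.gcd nn mn : Int) with hGdef
    have hGpos : 0 < G := by
      have h0 : 0 < Int.gcd nn mn := Int.gcd_pos_iff.mpr (Or.inl (by omega))
      rw [hGdef]; exact_mod_cast h0
    have hGnn : G ∣ nn := Int.gcd_dvd_left nn mn
    have hGmn : G ∣ mn := Int.gcd_dvd_right nn mn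
    set L : Int := (Int.lcm nn mn : Int) with hLdef
    have hGL : G * L = nn * mn := by
      have h := Int.gcd_mul_lcm nn mn
      have h' : G * L = (nn.natAbs : Int) * (mn.natAbs : Int) := by
        rw [hGdef, hLdef]; exact_mod_cast h
      rw [Int.natAbs_of_nonneg (show (0:Int) ≤ nn by omega),
        Int.natAbs_of_nonneg (show (0:Int) ≤ mn by omega)] at h'
      exact h'
    have hLpos : 0 < L := by nlinarith
    have hnnL : nn ∣ L := Int.dvd_lcm_left nn mn
    have hmnL : mn ∣ L := Int.dvd_lcm_right nn mn
    have hdiv : ∀ x : Int, (nn ∣ x ∧ mn ∣ x) ↔ L ∣ x := by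
      intro x
      constructor
      · rintro ⟨h1, h2⟩
        rw [hLdef, Int.coe_lcm]
        exact lcm_dvd h1 h2
      · intro h
        exact ⟨dvd_trans hnnL h, dvd_trans hmnL h⟩
    have hmxL : max nn mn ∣ L := by
      rcases le_total nn mn with h | h
      · rw [max_eq_right h]; exact hmnL
      · rw [max_eq_left h]; exact hnnL
    have hmx1 : 1 ≤ max nn mn := le_trans hnn (le_max_left nn mn)
    have hmxLe : max nn mn ≤ L := Int.le_of_dvd hLpos hmxL
    have hmxdvd : max nn mn ∣ (mn * nn - max nn mn) := by
      have h1 : max nn mn ∣ mn * nn := by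
        rcases le_total nn mn with h | h
        · rw [max_eq_right h]; exact Dvd.intro nn rfl
        · rw [max_eq_left h]; exact Dvd.intro_left mn rfl
      exact (dvd_sub_right h1).mpr dvd_rfl
    rw [task226Loop_spec nn mn (max nn mn) L hnn hmn rfl hLpos hmxL hdiv _ [] hmxdvd]
    have hgA : euclidLoop nn mn = G := euclidLoop_eq_gcd nn mn (by omega) (by omega)
    have hlcmB : PySem.Int.floordiv (nn * mn) G = L := by
      rw [PySem.Int.floordiv_eq_iff_of_pos hGpos]
      constructor <;> nlinarith
    have hfdA : PySem.Int.floordiv (mn * nn - max nn mn) L = G - 1 := by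
      rw [PySem.Int.floordiv_eq_iff_of_pos hLpos]
      constructor <;> nlinarith
    rw [hfdA]
    simp [hgA, hlcmB]
  · rw [if_pos (by omega)]
    rcases hpre with hnn | hmn
    · have hmn' : mn ≤ 0 := by omega
      have hmax : max nn mn = nn := max_eq_left (by omega)
      have hprod : mn * nn ≤ 0 :=
        mul_nonpos_of_nonpos_of_nonneg hmn' (by omega)
      rw [hmax, task226Loop, dif_neg (by omega)]
    · have hnn' : nn ≤ 0 := by omega
      have hmax : max nn mn = mn := max_eq_right (by omega)
      have hprod : mn * nn ≤ 0 :=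
        mul_nonpos_of_nonneg_of_nonpos (by omega) hnn'
      rw [hmax, task226Loop, dif_neg (by omega)]
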